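-- pv_equiv track=rewrite | github.com/pttypark/robotic-deadlock | deadlock/dsd_fsd/benchmark/layout_builder.py | _escape_points
-- ===== SOURCE A (Python) =====
-- Cell = tuple[int, int]
--
-- def _escape_points(
--     aisle_columns: tuple[int, ...],
--     transition_rows: tuple[int, ...],
--     width: int,
--     buffer_row: int,
-- ) -> frozenset[Cell]:
--     points: set[Cell] = set()
--     for x in aisle_columns:
--         for y in transition_rows:
--             for sx in (x - 1, x + 1):
--                 for sy in (y - 1, y, y + 1):
--                     if 0 <= sx < width and 0 <= sy < buffer_row:
--                         points.add((sx, sy))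
--     return frozenset(points)
-- ===== SOURCE B (Python) =====
-- def _escape_points(aisle_columns, transition_rows, width, buffer_row):
--     # Valid escape columns and escape rows are independent: emit their Cartesian product.
--     sxs = sorted({s for x in aisle_columns for s in (x - 1, x + 1) if 0 <= s < width})
--     sys_ = sorted({s for y in transition_rows for s in (y - 1, y, y + 1) if 0 <= s < buffer_row})
--     return frozenset((sx, sy) for sx in sxs for sy in sys_)
-- ===== Notes on version B (the rewrite author's own statement) =====
-- stated objective: faster
-- what changed: Instead of a quadruple nested loop over every (aisle, transition) pair, B computes the valid escape-column set and escape-row set independently (one pass over each input list) and returns their Cartesian product.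
import Mathlib
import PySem

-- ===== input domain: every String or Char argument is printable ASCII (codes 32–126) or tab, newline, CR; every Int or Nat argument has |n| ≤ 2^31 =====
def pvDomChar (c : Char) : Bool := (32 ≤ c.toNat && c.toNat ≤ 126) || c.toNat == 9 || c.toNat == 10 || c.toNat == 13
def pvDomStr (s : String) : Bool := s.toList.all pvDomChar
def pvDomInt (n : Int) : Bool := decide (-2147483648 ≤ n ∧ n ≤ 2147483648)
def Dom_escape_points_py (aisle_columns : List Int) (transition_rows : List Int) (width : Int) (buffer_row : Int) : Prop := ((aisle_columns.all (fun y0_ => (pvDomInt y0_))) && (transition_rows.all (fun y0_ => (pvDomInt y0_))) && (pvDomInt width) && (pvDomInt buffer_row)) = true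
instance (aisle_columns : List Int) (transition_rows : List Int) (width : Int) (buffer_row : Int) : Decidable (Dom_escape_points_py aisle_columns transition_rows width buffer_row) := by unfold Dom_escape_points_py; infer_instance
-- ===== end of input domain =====

-- B replaces A's quadruple nested loop by computing the valid escape-column and escape-row sets
-- independently and emitting their Cartesian product (asymptotically faster).
-- Both functions return a frozenset; a set's iteration order is not modelled, so both ports
-- return the set canonically sorted by the injective key toLex — exact as a set.

-- ===== PORT A =====
def escape_points_py (aisle_columns : List Int) (transition_rows : List Int) (width : Int) (buffer_row : Int) : List (Int × Int) :=
  let points : PySem.Set (Int × Int) :=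
    aisle_columns.foldl (fun pts x =>
      transition_rows.foldl (fun pts y =>
        [x - 1, x + 1].foldl (fun pts sx =>
          [y - 1, y, y + 1].foldl (fun pts sy =>
            if 0 ≤ sx ∧ sx < width ∧ 0 ≤ sy ∧ sy < buffer_row then PySem.Set.add pts (sx, sy) else pts)
            pts)
          pts)
        pts)
      PySem.Set.empty
  -- frozenset(points): canonical representative of the set (order not modelled)
  PySem.List.sorted points (fun p => toLex p) false

-- ===== PORT B =====
def escape_points_py_alt (aisle_columns : List Int) (transition_rows : List Int) (width : Int) (buffer_row : Int) : List (Int × Int) :=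
  let sxs := PySem.List.sorted
    (PySem.Set.ofList (aisle_columns.flatMap fun x =>
      ([x - 1, x + 1].filter fun s => decide (0 ≤ s) && decide (s < width))))
    (fun s => s) false
  let sys_ := PySem.List.sorted
    (PySem.Set.ofList (transition_rows.flatMap fun y =>
      ([y - 1, y, y + 1].filter fun s => decide (0 ≤ s) && decide (s < buffer_row))))
    (fun s => s) false
  let product := sxs.flatMap fun sx => sys_.map fun sy => (sx, sy)
  -- frozenset(product): canonical representative of the set (order not modelled)
  PySem.List.sorted (PySem.Set.ofList product) (fun p => toLex p) false

-- ===== PRECONDITION & SPEC =====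
def Spec_escape_points_py (aisle_columns : List Int) (transition_rows : List Int) (width : Int) (buffer_row : Int) (out : List (Int × Int)) : Prop := out = escape_points_py_alt aisle_columns transition_rows width buffer_row
instance (aisle_columns : List Int) (transition_rows : List Int) (width : Int) (buffer_row : Int) (out : List (Int × Int)) : Decidable (Spec_escape_points_py aisle_columns transition_rows width buffer_row out) := by unfold Spec_escape_points_py; infer_instance

-- ===== CLAIM (what is proved, stated in full; the proofs are below) =====
def Claim_equal_escape_points_py : Prop := ∀ (aisle_columns : List Int) (transition_rows : List Int) (width : Int) (buffer_row : Int), Dom_escape_points_py aisle_columns transition_rows width buffer_row → Spec_escape_points_py aisle_columns transition_rows width buffer_row (escape_points_py aisle_columns transition_rows width buffer_row)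

-- ===== LEMMAS AND PROOFS =====

-- membership characterisation of a fold that conditionally inserts into a Set
theorem pv_foldl_set_mem {α β : Type} [BEq β] [LawfulBEq β]
    (g : PySem.Set β → α → PySem.Set β) (Q : α → β → Prop)
    (h : ∀ s a x, x ∈ g s a ↔ x ∈ s ∨ Q a x) :
    ∀ (l : List α) (s : PySem.Set β) (x : β), x ∈ l.foldl g s ↔ x ∈ s ∨ ∃ a ∈ l, Q a x := by
  intro l
  induction l with
  | nil => intro s x; simp
  | cons a t ih =>
    intro s x
    simp only [List.foldl_cons, ih, h, List.mem_cons]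
    constructor
    · rintro ((hs | hq) | ⟨b, hb, hbq⟩)
      · exact Or.inl hs
      · exact Or.inr ⟨a, Or.inl rfl, hq⟩
      · exact Or.inr ⟨b, Or.inr hb, hbq⟩
    · rintro (hs | ⟨b, (rfl | hb), hbq⟩)
      · exact Or.inl (Or.inl hs)
      · exact Or.inl (Or.inr hbq)
      · exact Or.inr ⟨b, hb, hbq⟩

theorem pv_foldl_set_nodup {α β : Type} [BEq β] [LawfulBEq β]
    (g : PySem.Set β → α → PySem.Set β)
    (h : ∀ s a, s.Nodup → (g s a).Nodup) :
    ∀ (l : List α) (s : PySem.Set β), s.Nodup → (l.foldl g s).Nodup := by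
  intro l
  induction l with
  | nil => intro s hs; simpa using hs
  | cons a t ih => intro s hs; exact ih _ (h s a hs)

theorem escape_points_py_spec : Claim_equal_escape_points_py := by
  intro A T w b _
  unfold Spec_escape_points_py escape_points_py escape_points_py_alt
  apply PySem.List.sorted_eq_sorted_of_perm _ _ _ (fun _ _ h => toLex.injective h)
  apply (List.perm_ext_iff_of_nodup ?_ (PySem.Set.nodup_ofList _)).mpr
  · -- same membership
    intro p
    -- A side
    have hA : ∀ (x : Int), p ∈ (A.foldl (fun pts x =>
        T.foldl (fun pts y =>
          [x - 1, x + 1].foldl (fun pts sx =>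
            [y - 1, y, y + 1].foldl (fun pts sy =>
              if 0 ≤ sx ∧ sx < w ∧ 0 ≤ sy ∧ sy < b then PySem.Set.add pts (sx, sy) else pts)
              pts)
            pts)
          pts)
        PySem.Set.empty) ↔
        ∃ x ∈ A, ∃ y ∈ T, ∃ sx ∈ ([x - 1, x + 1] : List Int), ∃ sy ∈ ([y - 1, y, y + 1] : List Int),
          (0 ≤ sx ∧ sx < w ∧ 0 ≤ sy ∧ sy < b) ∧ p = (sx, sy) := by
      intro _
      rw [pv_foldl_set_mem _ (fun x p => ∃ y ∈ T, ∃ sx ∈ ([x - 1, x + 1] : List Int),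
          ∃ sy ∈ ([y - 1, y, y + 1] : List Int), (0 ≤ sx ∧ sx < w ∧ 0 ≤ sy ∧ sy < b) ∧ p = (sx, sy)) ?_]
      · simp [PySem.Set.empty]
      · intro s x q
        rw [pv_foldl_set_mem _ (fun y q => ∃ sx ∈ ([x - 1, x + 1] : List Int),
            ∃ sy ∈ ([y - 1, y, y + 1] : List Int), (0 ≤ sx ∧ sx < w ∧ 0 ≤ sy ∧ sy < b) ∧ q = (sx, sy)) ?_]
        intro s y q
        rw [pv_foldl_set_mem _ (fun sx q =>
            ∃ sy ∈ ([y - 1, y, y + 1] : List Int), (0 ≤ sx ∧ sx < w ∧ 0 ≤ sy ∧ sy < b) ∧ q = (sx, sy)) ?_]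
        intro s sx q
        rw [pv_foldl_set_mem _ (fun sy q => (0 ≤ sx ∧ sx < w ∧ 0 ≤ sy ∧ sy < b) ∧ q = (sx, sy)) ?_]
        intro s sy q
        split_ifs with hc
        · simp [PySem.Set.mem_add, hc]
        · simp [hc]
    rw [hA 0]
    -- B side
    simp only [PySem.Set.mem_ofList, List.mem_flatMap, List.mem_map, PySem.List.mem_sorted,
      List.mem_filter, List.mem_cons, Bool.and_eq_true, decide_eq_true_eq]
    constructor
    · rintro ⟨x, hx, y, hy, sx, hsx, sy, hsy, ⟨h1, h2, h3, h4⟩, rfl⟩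
      exact ⟨sx, ⟨x, hx, hsx, h1, h2⟩, sy, ⟨y, hy, hsy, h3, h4⟩, rfl⟩
    · rintro ⟨sx, ⟨x, hx, hsx, h1, h2⟩, sy, ⟨y, hy, hsy, h3, h4⟩, rfl⟩
      exact ⟨x, hx, y, hy, sx, hsx, sy, hsy, ⟨h1, h2, h3, h4⟩, rfl⟩
  · -- A's set is nodup
    apply pv_foldl_set_nodup _ ?_ _ _ List.nodup_nil
    intro s x hs
    apply pv_foldl_set_nodup _ ?_ _ _ hs
    intro s y hs
    apply pv_foldl_set_nodup _ ?_ _ _ hs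
    intro s sx hs
    apply pv_foldl_set_nodup _ ?_ _ _ hs
    intro s sy hs
    split_ifs
    · exact PySem.Set.nodup_add _ _ hs
    · exact hs
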